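-- pv_equiv track=rewrite | github.com/treyhunner/advent-of-code | 2025/day07/part2.py | solve
-- ===== SOURCE A (Python) =====
-- from collections import Counter
--
-- def solve(data):
--     possibilities = Counter([data[0].index("S")])
--     for line in data:
--         for index, char in enumerate(line):
--             if char == "^" and index in possibilities:
--                 count = possibilities.pop(index)
--                 possibilities[index-1] += count
--                 possibilities[index+1] += count
--     return possibilities.total()
-- ===== SOURCE B (Python) =====
-- def solve(data):
--     counts = {data[0].index("S"): 1}
--     for line in data:
--         new = {}
--         for p, c in counts.items():
--             if 0 <= p < len(line) and line[p] == "^":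
--                 k = p + 1
--                 while k < len(line) and line[k] == "^":
--                     k += 1
--                 for q in range(p - 1, k - 1):
--                     new[q] = new.get(q, 0) + c
--                 new[k] = new.get(k, 0) + c
--             else:
--                 new[p] = new.get(p, 0) + c
--         counts = new
--     return sum(counts.values())
-- ===== Notes on version B (the rewrite author's own statement) =====
-- stated objective: alternative
-- what changed: A simulates each line left-to-right, mutating one Counter in place so that a split at p feeds p+1 and cascades through the scan; B instead rebuilds a fresh dict per line, spreading each active column's count in one closed-form step over its caret run (columns p-1..k-2 and k), so no in-line cascade or scan order is needed.
import Mathlib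
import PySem

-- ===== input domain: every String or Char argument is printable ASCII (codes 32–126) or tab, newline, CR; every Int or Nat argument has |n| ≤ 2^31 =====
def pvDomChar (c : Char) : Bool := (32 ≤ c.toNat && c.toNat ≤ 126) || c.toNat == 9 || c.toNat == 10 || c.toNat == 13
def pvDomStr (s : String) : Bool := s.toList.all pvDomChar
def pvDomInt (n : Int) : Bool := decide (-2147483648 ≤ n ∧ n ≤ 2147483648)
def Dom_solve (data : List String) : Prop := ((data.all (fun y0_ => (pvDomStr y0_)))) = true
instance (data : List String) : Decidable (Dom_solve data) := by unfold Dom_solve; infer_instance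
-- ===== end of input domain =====

-- B rebuilds the column→count dict once per line with a closed-form spread over each caret run,
-- instead of A's in-place left-to-right Counter cascade; objective: alternative (same cost class).
-- A mutates no argument; the equivalence is about the return value.

-- ===== PORT A =====
-- body of A's inner loop: 'if char == "^" and index in possibilities: pop; +=; +='
def stepA (_cs : List Char) (d : PySem.Dict Int Int) (ic : Int × Char) : PySem.Dict Int Int :=
  if ic.2 == '^' && d.contains ic.1 then
    let c := d.getD ic.1 0            -- count = possibilities.pop(index) (value; key in d by the guard)
    let d1 := d.erase ic.1            -- (removal part of pop)
    let d2 := d1.modify (ic.1 - 1) 0 (· + c)   -- possibilities[index-1] += count  (Counter default 0)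
    d2.modify (ic.1 + 1) 0 (· + c)             -- possibilities[index+1] += count
  else d

def solve (data : List String) : Int :=
  match PySem.List.pyGet? data 0 with
  | none => 0                          -- IndexError on empty data: excluded by Pre_solve
  | some first =>
    match PySem.List.index? first.toList 'S' with   -- data[0].index("S"); single-char needle, exact
    | none => 0                        -- ValueError: excluded by Pre_solve
    | some idx =>
      let init : PySem.Dict Int Int := PySem.Dict.counter [(idx : Int)]   -- Counter([idx])
      let final := data.foldl
        (fun d line => (PySem.List.enumerate line.toList 0).foldl (stepA line.toList) d) init
      final.values.sum                 -- possibilities.total()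

-- ===== PORT B =====
-- while k < len(line) and line[k] == "^": k += 1
def runEnd (cs : List Char) (k : Nat) : Nat :=
  if h : k < cs.length ∧ cs.getD k ' ' = '^' then runEnd cs (k + 1) else k
termination_by cs.length - k
decreasing_by omega

-- new[q] = new.get(q, 0) + c
def bump (d : PySem.Dict Int Int) (q c : Int) : PySem.Dict Int Int := d.insert q (d.getD q 0 + c)

-- body of B's per-item loop
def stepB (cs : List Char) (new : PySem.Dict Int Int) (pc : Int × Int) : PySem.Dict Int Int :=
  if 0 ≤ pc.1 ∧ pc.1 < (cs.length : Int) ∧ cs.getD pc.1.toNat ' ' = '^' then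
    let k : Nat := runEnd cs (pc.1.toNat + 1)
    let n1 := (PySem.List.pyRange (pc.1 - 1) ((k : Int) - 1) 1).foldl (fun n q => bump n q pc.2) new
    bump n1 (k : Int) pc.2
  else bump new pc.1 pc.2

def solve_alt (data : List String) : Int :=
  match PySem.List.pyGet? data 0 with
  | none => 0                          -- IndexError on empty data: excluded by Pre_solve
  | some first =>
    match PySem.List.index? first.toList 'S' with
    | none => 0                        -- ValueError: excluded by Pre_solve
    | some idx =>
      let init : PySem.Dict Int Int := PySem.Dict.empty.insert (idx : Int) 1   -- {idx: 1}
      let final := data.foldl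
        (fun counts line => counts.items.foldl (stepB line.toList) PySem.Dict.empty) init
      final.values.sum                 -- sum(counts.values())

-- ===== PRECONDITION & SPEC =====
-- Pre_solve = exactly where A returns: data nonempty (else IndexError) and 'S' in data[0] (else ValueError)
def Pre_solve (data : List String) : Prop := data ≠ [] ∧ 'S' ∈ (data.headD "").toList
instance (data : List String) : Decidable (Pre_solve data) := by unfold Pre_solve; infer_instance
def pvWitness_solve : List String := ["S^.", "^^^"]
def Spec_solve (data : List String) (out : Int) : Prop := out = solve_alt data
instance (data : List String) (out : Int) : Decidable (Spec_solve data out) := by unfold Spec_solve; infer_instance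

-- ===== CLAIM (what is proved, stated in full; the proofs are below) =====
def Claim_equal_solve : Prop := ∀ (data : List String), Dom_solve data → Pre_solve data → Spec_solve data (solve data)

-- ===== LEMMAS AND PROOFS =====

-- weighted sum of a dict's item list against a column weight g
def Wl (l : List (Int × Int)) (g : Int → Int) : Int := (l.map (fun pc => pc.2 * g pc.1)).sum

-- first-match lookup on an item list (= Dict.getD · 0 on its dict)
def lk (l : List (Int × Int)) (q : Int) : Int := ((l.find? (fun pc => pc.1 == q)).map Prod.snd).getD 0

-- invariant carried across the simulation: unique keys, strictly positive counts
def goodD (d : PySem.Dict Int Int) : Prop := d.keys.Nodup ∧ ∀ pc ∈ d.items, 0 < pc.2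

-- where one unit sitting at column p before the scan of line cs ends up (a 0/1 distribution over q)
def distL (cs : List Char) (p q : Int) : Int :=
  if h : 0 ≤ p ∧ p < (cs.length : Int) ∧ cs.getD p.toNat ' ' = '^' then
    (if q = p - 1 then 1 else 0) + distL cs (p + 1) q
  else (if q = p then 1 else 0)
termination_by (cs.length - p.toNat)
decreasing_by omega

-- the same distribution gated at scan position i: columns already passed stay put
def dFrom (cs : List Char) (i : Int) (p q : Int) : Int :=
  if p < i then (if q = p then 1 else 0) else distL cs p q

theorem lk_cons (p c : Int) (t : List (Int × Int)) (q : Int) :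
    lk ((p, c) :: t) q = if p = q then c else lk t q := by
  by_cases h : p = q
  · simp [lk, List.find?_cons_of_pos, h]
  · rw [lk, List.find?_cons_of_neg, ← lk]
    · simp [h]
    · simpa using h

theorem lk_eq_zero_of_not_mem (t : List (Int × Int)) (q : Int) (h : q ∉ t.map Prod.fst) :
    lk t q = 0 := by
  have : t.find? (fun pc => pc.1 == q) = none := by
    rw [List.find?_eq_none]
    intro x hx
    simp only [beq_iff_eq]
    exact fun hq => h (List.mem_map.mpr ⟨x, hx, hq⟩)
  simp [lk, this]

theorem getD_eq_lk (d : PySem.Dict Int Int) (q : Int) : d.getD q 0 = lk d.items q := rfl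

theorem Wl_nil (g : Int → Int) : Wl [] g = 0 := rfl
theorem Wl_cons (p c : Int) (t : List (Int × Int)) (g : Int → Int) :
    Wl ((p, c) :: t) g = c * g p + Wl t g := by simp [Wl]
theorem Wl_append (l₁ l₂ : List (Int × Int)) (g : Int → Int) :
    Wl (l₁ ++ l₂) g = Wl l₁ g + Wl l₂ g := by simp [Wl]
theorem Wl_congr (l : List (Int × Int)) (g₁ g₂ : Int → Int) (h : ∀ p, g₁ p = g₂ p) :
    Wl l g₁ = Wl l g₂ := by simp [Wl, h]

theorem Wl_congr_single (l : List (Int × Int)) (hn : (l.map Prod.fst).Nodup) (k : Int)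
    (g₁ g₂ : Int → Int) (h : ∀ p, p ≠ k → g₁ p = g₂ p) :
    Wl l g₁ = Wl l g₂ + lk l k * (g₁ k - g₂ k) := by
  induction l with
  | nil => simp [Wl_nil, lk]
  | cons hd t ih =>
    obtain ⟨p, c⟩ := hd
    simp only [List.map_cons, List.nodup_cons] at hn
    rw [Wl_cons, Wl_cons, lk_cons, ih hn.2]
    by_cases hp : p = k
    · subst hp
      rw [lk_eq_zero_of_not_mem t p hn.1]
      simp; ring
    · rw [h p hp]; simp [hp]; ring

theorem Wl_delta_zero (t : List (Int × Int)) (q : Int) (h : q ∉ t.map Prod.fst) :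
    Wl t (fun p => if q = p then 1 else 0) = 0 := by
  induction t with
  | nil => rfl
  | cons hd t ih =>
    obtain ⟨p, c⟩ := hd
    simp only [List.map_cons, List.mem_cons] at h
    push Not at h
    rw [Wl_cons, ih h.2, if_neg h.1]
    ring

theorem lk_eq_Wl_delta (l : List (Int × Int)) (hn : (l.map Prod.fst).Nodup) (q : Int) :
    lk l q = Wl l (fun p => if q = p then 1 else 0) := by
  induction l with
  | nil => simp [lk, Wl_nil]
  | cons hd t ih =>
    obtain ⟨p, c⟩ := hd
    simp only [List.map_cons, List.nodup_cons] at hn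
    rw [lk_cons, Wl_cons]
    by_cases hp : p = q
    · subst hp
      rw [Wl_delta_zero t p hn.1]
      simp
    · rw [ih hn.2, if_neg (fun hq : q = p => hp hq.symm)]
      rw [if_neg hp]; ring

theorem Wl_filter_out (l : List (Int × Int)) (hn : (l.map Prod.fst).Nodup) (q : Int) (g : Int → Int) :
    Wl l g = Wl (l.filter (fun p => !(p.1 == q))) g + lk l q * g q := by
  induction l with
  | nil => simp [Wl_nil, lk]
  | cons hd t ih =>
    obtain ⟨p, c⟩ := hd
    simp only [List.map_cons, List.nodup_cons] at hn
    rw [Wl_cons, lk_cons]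
    by_cases hp : p = q
    · subst hp
      have hf : t.filter (fun r => !(r.1 == p)) = t := by
        apply List.filter_eq_self.mpr
        intro r hr
        simp only [Bool.not_eq_eq_eq_not, Bool.not_true, beq_eq_false_iff_ne, ne_eq]
        exact fun he => hn.1 (List.mem_map.mpr ⟨r, hr, he⟩)
      rw [List.filter_cons_of_neg (by simp), hf, if_pos rfl]
      ring
    · rw [List.filter_cons_of_pos (by simpa using hp), Wl_cons, ih hn.2, if_neg hp]
      ring

theorem lk_of_mem (l : List (Int × Int)) (hn : (l.map Prod.fst).Nodup) (p c : Int)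
    (h : (p, c) ∈ l) : lk l p = c := by
  induction l with
  | nil => cases h
  | cons hd t ih =>
    obtain ⟨p', c'⟩ := hd
    simp only [List.map_cons, List.nodup_cons] at hn
    rw [lk_cons]
    rcases List.mem_cons.mp h with h1 | h1
    · obtain ⟨rfl, rfl⟩ := Prod.mk.injEq .. ▸ (by exact Prod.mk.inj h1.symm : p' = p ∧ c' = c)
      simp
    · have hne : p' ≠ p := fun he => hn.1 (List.mem_map.mpr ⟨(p, c), h1, he.symm ▸ rfl⟩)
      rw [if_neg hne]
      exact ih hn.2 h1

theorem mem_of_lk (l : List (Int × Int)) (p c : Int) (hc : c ≠ 0) (h : lk l p = c) :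
    (p, c) ∈ l := by
  induction l with
  | nil => exact absurd h.symm (by simpa [lk] using hc)
  | cons hd t ih =>
    obtain ⟨p', c'⟩ := hd
    rw [lk_cons] at h
    by_cases hp : p' = p
    · subst hp
      rw [if_pos rfl] at h
      exact List.mem_cons.mpr (Or.inl (by rw [h]))
    · rw [if_neg hp] at h
      exact List.mem_cons.mpr (Or.inr (ih h))

-- two good dicts with the same lookup have permuted item lists
theorem items_perm (d₁ d₂ : PySem.Dict Int Int) (h₁ : goodD d₁) (h₂ : goodD d₂)
    (h : ∀ q, d₁.getD q 0 = d₂.getD q 0) : d₁.items.Perm d₂.items := by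
  have hk₁ : (d₁.items.map Prod.fst).Nodup := h₁.1
  have hk₂ : (d₂.items.map Prod.fst).Nodup := h₂.1
  have hl : ∀ q, lk d₁.items q = lk d₂.items q := by
    intro q; rw [← getD_eq_lk, ← getD_eq_lk]; exact h q
  apply (List.perm_ext_iff_of_nodup hk₁.of_map hk₂.of_map).mpr
  rintro ⟨p, c⟩
  constructor
  · intro hm
    have hc : c ≠ 0 := ne_of_gt (h₁.2 _ hm)
    exact mem_of_lk _ p c hc (by rw [← hl]; exact lk_of_mem _ hk₁ p c hm)
  · intro hm
    have hc : c ≠ 0 := ne_of_gt (h₂.2 _ hm)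
    exact mem_of_lk _ p c hc (by rw [hl]; exact lk_of_mem _ hk₂ p c hm)

theorem getD_nonneg (d : PySem.Dict Int Int) (hp : ∀ pc ∈ d.items, 0 < pc.2) (q : Int) :
    0 ≤ d.getD q 0 := by
  rw [PySem.Dict.getD_eq_get?_getD]
  cases hg : d.get? q with
  | none => simp
  | some v =>
    have := PySem.Dict.mem_items_of_get?_eq_some d hg
    exact le_of_lt (by simpa using hp _ this)

-- bump lemmas
theorem getD_bump (d : PySem.Dict Int Int) (q c q' : Int) :
    (bump d q c).getD q' 0 = if q' = q then d.getD q 0 + c else d.getD q' 0 := by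
  simp [bump, PySem.Dict.getD_insert]

theorem nodup_keys_bump (d : PySem.Dict Int Int) (q c : Int) (hn : d.keys.Nodup) :
    (bump d q c).keys.Nodup := PySem.Dict.nodup_keys_insert _ _ _ hn

theorem pos_bump (d : PySem.Dict Int Int) (q c : Int) (hc : 0 < c)
    (hp : ∀ pc ∈ d.items, 0 < pc.2) : ∀ pc ∈ (bump d q c).items, 0 < pc.2 := by
  intro pc hpc
  rcases (PySem.Dict.mem_items_insert _ _ _ _).mp hpc with h1 | h1
  · subst h1
    have := getD_nonneg d hp q
    simpa using by omega
  · exact hp _ h1.1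

theorem goodD_bump (d : PySem.Dict Int Int) (q c : Int) (hc : 0 < c) (hd : goodD d) :
    goodD (bump d q c) := ⟨nodup_keys_bump d q c hd.1, pos_bump d q c hc hd.2⟩

theorem Wl_replace (l : List (Int × Int)) (hn : (l.map Prod.fst).Nodup) (q v : Int)
    (hm : q ∈ l.map Prod.fst) (g : Int → Int) :
    Wl (l.map (fun p => if p.1 == q then (q, v) else p)) g
      = Wl l g - lk l q * g q + v * g q := by
  induction l with
  | nil => cases hm
  | cons hd t ih =>
    obtain ⟨p, c⟩ := hd
    simp only [List.map_cons, List.nodup_cons] at hn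
    rw [List.map_cons, lk_cons]
    by_cases hp : p = q
    · subst hp
      have hmap : t.map (fun r => if r.1 == p then (p, v) else r) = t := by
        rw [show t = t.map id from (List.map_id t).symm]
        rw [List.map_map]
        apply List.map_congr_left
        intro r hr
        have : r.1 ≠ p := fun he => hn.1 (List.mem_map.mpr ⟨r, hr, he⟩)
        simp [this]
      simp only [beq_self_eq_true, if_pos]
      rw [hmap, Wl_cons, Wl_cons]
      ring
    · have hm' : q ∈ t.map Prod.fst := by
        rcases List.mem_cons.mp (by simpa using hm : q ∈ p :: t.map Prod.fst) with h1 | h1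
        · exact absurd h1 (fun he => hp he.symm)
        · exact h1
      rw [if_neg (by simp [hp] : ¬(((p, c).1 == q) = true))]
      rw [Wl_cons, Wl_cons, ih hn.2 hm', if_neg hp]
      ring

theorem Wl_bump (d : PySem.Dict Int Int) (hn : d.keys.Nodup) (q c : Int) (g : Int → Int) :
    Wl (bump d q c).items g = Wl d.items g + c * g q := by
  by_cases hco : d.contains q = true
  · have hm : q ∈ d.items.map Prod.fst := (PySem.Dict.contains_iff_mem_keys d q).mp hco
    rw [bump, PySem.Dict.items_insert_of_contains d _ hco,
        Wl_replace d.items hn q _ hm g, ← getD_eq_lk]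
    ring
  · have hco' : d.contains q = false := by simpa using hco
    rw [bump, PySem.Dict.items_insert_of_not_contains d _ hco', Wl_append,
        PySem.Dict.getD_of_not_contains d _ hco']
    simp [Wl]

-- erase lemmas
theorem items_erase (d : PySem.Dict Int Int) (q : Int) :
    (d.erase q).items = d.items.filter (fun p => !(p.1 == q)) := rfl

theorem nodup_keys_erase (d : PySem.Dict Int Int) (q : Int) (hn : d.keys.Nodup) :
    (d.erase q).keys.Nodup := by
  have hsub : ((d.erase q).items.map Prod.fst).Sublist (d.items.map Prod.fst) := by
    rw [items_erase]
    exact List.Sublist.map Prod.fst List.filter_sublist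
  exact List.Nodup.sublist hsub hn

theorem pos_erase (d : PySem.Dict Int Int) (q : Int) (hp : ∀ pc ∈ d.items, 0 < pc.2) :
    ∀ pc ∈ (d.erase q).items, 0 < pc.2 := by
  intro pc hpc
  rw [items_erase] at hpc
  exact hp _ (List.mem_of_mem_filter hpc)

theorem Wl_erase (d : PySem.Dict Int Int) (hn : d.keys.Nodup) (q : Int) (g : Int → Int) :
    Wl (d.erase q).items g = Wl d.items g - d.getD q 0 * g q := by
  rw [items_erase, getD_eq_lk]
  have := Wl_filter_out d.items hn q g
  omega

-- distL basics
theorem dist_of_out (cs : List Char) (p q : Int)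
    (h : ¬(0 ≤ p ∧ p < (cs.length : Int) ∧ cs.getD p.toNat ' ' = '^')) :
    distL cs p q = if q = p then 1 else 0 := by
  rw [distL, dif_neg h]

theorem dist_of_car (cs : List Char) (p q : Int)
    (h : 0 ≤ p ∧ p < (cs.length : Int) ∧ cs.getD p.toNat ' ' = '^') :
    distL cs p q = (if q = p - 1 then 1 else 0) + distL cs (p + 1) q := by
  rw [distL, dif_pos h]

theorem runEnd_ge (cs : List Char) (k : Nat) : k ≤ runEnd cs k := by
  rw [runEnd]
  split_ifs with h
  · have := runEnd_ge cs (k + 1)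
    omega
  · exact le_refl k
termination_by cs.length - k
decreasing_by omega

theorem runEnd_eq_of_stop (cs : List Char) (k : Nat)
    (h : ¬(k < cs.length ∧ cs.getD k ' ' = '^')) : runEnd cs k = k := by
  rw [runEnd, dif_neg h]

theorem runEnd_eq_of_go (cs : List Char) (k : Nat)
    (h : k < cs.length ∧ cs.getD k ' ' = '^') : runEnd cs k = runEnd cs (k + 1) := by
  rw [runEnd]; rw [dif_pos h]

-- closed form for distL on a caret run: one unit at p goes to p-1 .. K-2 and K
theorem dist_run (cs : List Char) (p q : Int)
    (h : 0 ≤ p ∧ p < (cs.length : Int) ∧ cs.getD p.toNat ' ' = '^') :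
    distL cs p q =
      (if p - 1 ≤ q ∧ q < (runEnd cs (p.toNat + 1) : Int) - 1 then 1 else 0) +
      (if q = (runEnd cs (p.toNat + 1) : Int) then 1 else 0) := by
  have hpt : (p + 1).toNat = p.toNat + 1 := by omega
  have hge := runEnd_ge cs (p.toNat + 1)
  rw [dist_of_car _ _ _ h]
  by_cases h2 : 0 ≤ p + 1 ∧ p + 1 < (cs.length : Int) ∧ cs.getD (p + 1).toNat ' ' = '^'
  · have hK : runEnd cs (p.toNat + 1) = runEnd cs (p.toNat + 2) := by
      apply runEnd_eq_of_go
      constructor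
      · omega
      · rw [← hpt]; exact h2.2.2
    have ih := dist_run cs (p + 1) q h2
    rw [hpt] at ih
    rw [ih, ← hK]
    have hplt : p < (runEnd cs (p.toNat + 1) : Int) := by omega
    split_ifs <;> omega
  · have hK : runEnd cs (p.toNat + 1) = p.toNat + 1 := by
      apply runEnd_eq_of_stop
      intro hcon
      exact h2 ⟨by omega, by omega, by rw [hpt]; exact hcon.2⟩
    rw [dist_of_out cs (p + 1) q h2, hK]
    split_ifs <;> omega
termination_by cs.length - p.toNat
decreasing_by omega

-- ===== A-side characterisation =====
theorem stepA_inv (cs : List Char) (d : PySem.Dict Int Int) (i : Nat) (ch : Char) (q : Int)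
    (hd : goodD d) (hi : i < cs.length) (hch : ch = cs.getD i ' ') :
    goodD (stepA cs d ((i : Int), ch)) ∧
      Wl (stepA cs d ((i : Int), ch)).items (fun p => dFrom cs ((i : Int) + 1) p q)
        = Wl d.items (fun p => dFrom cs (i : Int) p q) := by
  have hoff : ∀ p : Int, p ≠ (i : Int) →
      dFrom cs ((i : Int) + 1) p q = dFrom cs (i : Int) p q := by
    intro p hp
    unfold dFrom
    by_cases h1 : p < (i : Int)
    · rw [if_pos h1, if_pos (by omega)]
    · rw [if_neg h1, if_neg (by omega)]
  unfold stepA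
  by_cases hg : (ch == '^' && d.contains ((i : Int), ch).1) = true
  · rw [if_pos hg]
    simp only [Bool.and_eq_true, beq_iff_eq] at hg
    obtain ⟨hch2, hcon⟩ := hg
    -- the popped count is positive
    have hget : ∃ v, d.get? (i : Int) = some v := by
      cases hv : d.get? (i : Int) with
      | none =>
        rw [PySem.Dict.contains_eq_isSome_get?, hv] at hcon
        simp at hcon
      | some v => exact ⟨v, rfl⟩
    obtain ⟨v, hv⟩ := hget
    have hmemv := PySem.Dict.mem_items_of_get?_eq_some d hv
    have hgetD : d.getD (i : Int) 0 = v := PySem.Dict.getD_of_get?_eq_some d 0 hv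
    have hcpos : 0 < d.getD (i : Int) 0 := by rw [hgetD]; exact hd.2 _ hmemv
    -- structure: erase then two bumps
    have e2 : ∀ (d' : PySem.Dict Int Int) (k c : Int), d'.modify k 0 (· + c) = bump d' k c := fun _ _ _ => rfl
    simp only [e2]
    set c := d.getD ((i : Int), ch).1 0 with hc
    have hn1 := nodup_keys_erase d (i : Int) hd.1
    have hp1 := pos_erase d (i : Int) hd.2
    have hn2 := nodup_keys_bump (d.erase (i : Int)) ((i : Int) - 1) c hn1
    have hp2 := pos_bump (d.erase (i : Int)) ((i : Int) - 1) c hcpos hp1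
    constructor
    · exact ⟨nodup_keys_bump _ _ _ hn2, pos_bump _ _ _ hcpos hp2⟩
    · set g : Int → Int := fun p => dFrom cs ((i : Int) + 1) p q with hgdef
      rw [Wl_bump _ hn2 _ _ g, Wl_bump _ hn1 _ _ g, Wl_erase d hd.1 _ g]
      rw [Wl_congr_single d.items hd.1 (i : Int)
            (fun p => dFrom cs (i : Int) p q) g (fun p hp => (hoff p hp).symm)]
      rw [← getD_eq_lk]
      -- evaluate the four weights
      have hcar : 0 ≤ (i : Int) ∧ (i : Int) < (cs.length : Int) ∧ cs.getD ((i : Int)).toNat ' ' = '^' := by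
        refine ⟨by omega, by exact_mod_cast hi, ?_⟩
        rw [Int.toNat_natCast]
        rw [← hch]
        exact hch2
      have hv1 : g (i : Int) = (if q = (i : Int) then 1 else 0) := by
        simp only [hgdef, dFrom]
        rw [if_pos (by omega : (i : Int) < (i : Int) + 1)]
      have hv2 : g ((i : Int) - 1) = (if q = (i : Int) - 1 then 1 else 0) := by
        simp only [hgdef, dFrom]
        rw [if_pos (by omega : (i : Int) - 1 < (i : Int) + 1)]
      have hv3 : g ((i : Int) + 1) = distL cs ((i : Int) + 1) q := by
        simp only [hgdef, dFrom]
        rw [if_neg (by omega : ¬((i : Int) + 1 < (i : Int) + 1))]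
      have hv4 : dFrom cs (i : Int) (i : Int) q
          = (if q = (i : Int) - 1 then 1 else 0) + distL cs ((i : Int) + 1) q := by
        simp only [dFrom]
        rw [if_neg (by omega : ¬((i : Int) < (i : Int))), dist_of_car cs (i : Int) q hcar]
      rw [hv1, hv2, hv3, hv4]
      ring
  · rw [if_neg hg]
    refine ⟨hd, ?_⟩
    rw [Wl_congr_single d.items hd.1 (i : Int)
          (fun p => dFrom cs ((i : Int) + 1) p q)
          (fun p => dFrom cs (i : Int) p q) hoff]
    simp only [Bool.and_eq_true, beq_iff_eq] at hg
    by_cases hch2 : ch = '^'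
    · have hcon : d.contains ((i : Int), ch).1 = false := by
        cases hcb : d.contains ((i : Int), ch).1
        · rfl
        · exact absurd ⟨hch2, hcb⟩ hg
      have hnk : (i : Int) ∉ d.items.map Prod.fst := by
        intro hmem
        have htr : d.contains (i : Int) = true :=
          (PySem.Dict.contains_iff_mem_keys d (i : Int)).mpr hmem
        rw [show d.contains ((i : Int), ch).1 = d.contains (i : Int) from rfl] at hcon
        simp [hcon] at htr
      rw [lk_eq_zero_of_not_mem d.items (i : Int) hnk]
      ring
    · have hnc : ¬(0 ≤ (i : Int) ∧ (i : Int) < (cs.length : Int) ∧ cs.getD ((i : Int)).toNat ' ' = '^') := by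
        intro hcar
        apply hch2
        rw [hch, ← hcar.2.2, Int.toNat_natCast]
      have heq : dFrom cs ((i : Int) + 1) (i : Int) q = dFrom cs (i : Int) (i : Int) q := by
        simp only [dFrom]
        rw [if_pos (by omega : (i : Int) < (i : Int) + 1),
            if_neg (by omega : ¬((i : Int) < (i : Int))),
            dist_of_out cs (i : Int) q hnc]
      rw [heq]
      ring

theorem scanA_general (cs : List Char) (q : Int) :
    ∀ (suf : List Char) (i : Nat) (d : PySem.Dict Int Int), cs.drop i = suf → goodD d →
      goodD ((PySem.List.enumerate suf (i : Int)).foldl (stepA cs) d) ∧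
      Wl ((PySem.List.enumerate suf (i : Int)).foldl (stepA cs) d).items
          (fun p => dFrom cs ((i : Int) + suf.length) p q)
        = Wl d.items (fun p => dFrom cs (i : Int) p q) := by
  intro suf
  induction suf with
  | nil =>
    intro i d _ hd
    refine ⟨by simpa [PySem.List.enumerate] using hd, ?_⟩
    simp [PySem.List.enumerate]
  | cons c0 rest ih =>
    intro i d hdrop hd
    have hi : i < cs.length := by
      by_contra hle
      rw [List.drop_eq_nil_of_le (by omega)] at hdrop
      cases hdrop
    have hc0 : cs.getD i ' ' = c0 := by
      have h0 : cs[i]? = some c0 := by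
        have : (cs.drop i)[0]? = cs[i + 0]? := List.getElem?_drop
        rw [hdrop] at this
        simpa using this.symm
      rw [List.getD_eq_getElem?_getD, h0]
      rfl
    have hrest : cs.drop (i + 1) = rest := by
      have := congrArg List.tail hdrop
      rwa [List.tail_drop] at this
    obtain ⟨hga, hwa⟩ := stepA_inv cs d i c0 q hd hi hc0.symm
    have hcast : ((i + 1 : Nat) : Int) = (i : Int) + 1 := by push_cast; ring
    obtain ⟨hg, hw⟩ := ih (i + 1) (stepA cs d ((i : Int), c0)) hrest hga
    rw [hcast] at hg hw
    rw [PySem.List.enumerate_cons, List.foldl_cons]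
    refine ⟨hg, ?_⟩
    have harg : (i : Int) + ((c0 :: rest).length : Int) = ((i : Int) + 1) + (rest.length : Int) := by
      push_cast [List.length_cons]; ring
    rw [harg, hw, hwa]

theorem dFrom_len (cs : List Char) (p q : Int) :
    dFrom cs (cs.length : Int) p q = (if q = p then 1 else 0) := by
  simp only [dFrom]
  by_cases h : p < (cs.length : Int)
  · rw [if_pos h]
  · rw [if_neg h, dist_of_out cs p q (by omega)]

theorem dFrom_zero (cs : List Char) (p q : Int) :
    dFrom cs 0 p q = distL cs p q := by
  simp only [dFrom]
  by_cases h : p < 0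
  · rw [if_pos h, dist_of_out cs p q (by omega)]
  · rw [if_neg h]

theorem lineA_char (cs : List Char) (d : PySem.Dict Int Int) (hd : goodD d) :
    goodD ((PySem.List.enumerate cs 0).foldl (stepA cs) d) ∧
    ∀ q, ((PySem.List.enumerate cs 0).foldl (stepA cs) d).getD q 0
        = Wl d.items (fun p => distL cs p q) := by
  have hmain := fun q => scanA_general cs q cs 0 d (by simp) hd
  simp only [Nat.cast_zero, zero_add] at hmain
  refine ⟨(hmain 0).1, fun q => ?_⟩
  have hw := (hmain q).2
  rw [getD_eq_lk, lk_eq_Wl_delta _ ((hmain 0).1).1 q]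
  calc Wl (List.foldl (stepA cs) d (PySem.List.enumerate cs 0)).items (fun p => if q = p then 1 else 0)
      = Wl (List.foldl (stepA cs) d (PySem.List.enumerate cs 0)).items
          (fun p => dFrom cs (cs.length : Int) p q) := by
        exact (Wl_congr _ _ _ (fun p => (dFrom_len cs p q).symm))
    _ = Wl d.items (fun p => dFrom cs 0 p q) := hw
    _ = Wl d.items (fun p => distL cs p q) := Wl_congr _ _ _ (fun p => dFrom_zero cs p q)

-- ===== B-side characterisation =====
theorem loop_bump (c : Int) (r : List Int) : ∀ (n : PySem.Dict Int Int), goodD n → 0 < c →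
    goodD (r.foldl (fun n x => bump n x c) n) ∧
    ∀ q, (r.foldl (fun n x => bump n x c) n).getD q 0
        = n.getD q 0 + c * (r.count q : Int) := by
  induction r with
  | nil => intro n hn _; simpa using hn
  | cons x r ih =>
    intro n hn hc
    have h' := goodD_bump n x c hc hn
    obtain ⟨hg, hv⟩ := ih (bump n x c) h' hc
    refine ⟨hg, fun q => ?_⟩
    rw [List.foldl_cons, hv q, getD_bump, List.count_cons]
    by_cases hq : q = x
    · subst hq; simp; ring
    · simp only [beq_iff_eq]
      rw [if_neg hq, if_neg (fun he : x = q => hq he.symm)]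
      push_cast; ring

theorem count_nodup (r : List Int) (hr : r.Nodup) (q : Int) :
    (r.count q : Int) = if q ∈ r then 1 else 0 := by
  by_cases hq : q ∈ r
  · rw [if_pos hq]
    exact_mod_cast List.count_eq_one_of_mem hr hq
  · rw [if_neg hq]
    exact_mod_cast List.count_eq_zero_of_not_mem hq

theorem stepB_inv (cs : List Char) (n : PySem.Dict Int Int) (p c : Int)
    (hn : goodD n) (hc : 0 < c) :
    goodD (stepB cs n (p, c)) ∧
    ∀ q, (stepB cs n (p, c)).getD q 0 = n.getD q 0 + c * distL cs p q := by
  unfold stepB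
  by_cases h : 0 ≤ p ∧ p < (cs.length : Int) ∧ cs.getD p.toNat ' ' = '^'
  · rw [if_pos h]
    simp only
    obtain ⟨hg, hv⟩ := loop_bump c (PySem.List.pyRange (p - 1) ((runEnd cs (p.toNat + 1) : Int) - 1) 1) n hn hc
    refine ⟨goodD_bump _ _ _ hc hg, fun q => ?_⟩
    rw [getD_bump, dist_run cs p q h]
    have hcount := count_nodup (PySem.List.pyRange (p - 1) ((runEnd cs (p.toNat + 1) : Int) - 1) 1) (PySem.List.nodup_pyRange_one _ _) q
    by_cases hqK : q = (runEnd cs (p.toNat + 1) : Int)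
    · subst hqK
      rw [if_pos rfl, hv ((runEnd cs (p.toNat + 1) : Int))]
      rw [count_nodup (PySem.List.pyRange (p - 1) ((runEnd cs (p.toNat + 1) : Int) - 1) 1) (PySem.List.nodup_pyRange_one _ _) _]
      rw [if_neg (by rw [PySem.List.mem_pyRange_one]; omega), if_pos rfl,
          if_neg (by omega : ¬(p - 1 ≤ ((runEnd cs (p.toNat + 1) : Int)) ∧ (runEnd cs (p.toNat + 1) : Int) < (runEnd cs (p.toNat + 1) : Int) - 1))]
      ring
    · rw [if_neg hqK, hv q, hcount, if_neg hqK]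
      by_cases hmem : p - 1 ≤ q ∧ q < (runEnd cs (p.toNat + 1) : Int) - 1
      · rw [if_pos (by rw [PySem.List.mem_pyRange_one]; omega : q ∈ PySem.List.pyRange (p - 1) ((runEnd cs (p.toNat + 1) : Int) - 1) 1), if_pos hmem]
        ring
      · rw [if_neg (by rw [PySem.List.mem_pyRange_one]; omega : ¬ q ∈ PySem.List.pyRange (p - 1) ((runEnd cs (p.toNat + 1) : Int) - 1) 1), if_neg hmem]
        ring
  · rw [if_neg h]
    refine ⟨goodD_bump _ _ _ hc hn, fun q => ?_⟩
    rw [getD_bump, dist_of_out cs p q h]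
    by_cases hq : q = p
    · rw [if_pos hq, if_pos hq, hq]; ring
    · rw [if_neg hq, if_neg hq]; ring

theorem lineB_char (cs : List Char) (l : List (Int × Int)) :
    ∀ (n : PySem.Dict Int Int), goodD n → (∀ pc ∈ l, 0 < pc.2) →
      goodD (l.foldl (stepB cs) n) ∧
      ∀ q, (l.foldl (stepB cs) n).getD q 0 = n.getD q 0 + Wl l (fun p => distL cs p q) := by
  induction l with
  | nil => intro n hn _; simpa [Wl_nil] using hn
  | cons pc l ih =>
    intro n hn hp
    obtain ⟨p, c⟩ := pc
    have hc : 0 < c := hp (p, c) (List.mem_cons_self)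
    obtain ⟨hg1, hv1⟩ := stepB_inv cs n p c hn hc
    obtain ⟨hg, hv⟩ := ih (stepB cs n (p, c)) hg1 (fun r hr => hp r (List.mem_cons_of_mem _ hr))
    refine ⟨hg, fun q => ?_⟩
    rw [List.foldl_cons, hv q, hv1 q, Wl_cons]
    ring

-- ===== putting the lines together =====
theorem goodD_empty : goodD (PySem.Dict.empty : PySem.Dict Int Int) := by
  constructor
  · simp [PySem.Dict.keys, PySem.Dict.empty]
  · intro pc hpc; simp [PySem.Dict.empty] at hpc

theorem lines_inv (data : List String) :
    ∀ (d₁ d₂ : PySem.Dict Int Int), goodD d₁ → goodD d₂ → (∀ q, d₁.getD q 0 = d₂.getD q 0) →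
      goodD (data.foldl (fun d line => (PySem.List.enumerate line.toList 0).foldl (stepA line.toList) d) d₁) ∧
      goodD (data.foldl (fun counts line => counts.items.foldl (stepB line.toList) PySem.Dict.empty) d₂) ∧
      ∀ q, (data.foldl (fun d line => (PySem.List.enumerate line.toList 0).foldl (stepA line.toList) d) d₁).getD q 0
          = (data.foldl (fun counts line => counts.items.foldl (stepB line.toList) PySem.Dict.empty) d₂).getD q 0 := by
  induction data with
  | nil => intro d₁ d₂ h₁ h₂ h; exact ⟨h₁, h₂, h⟩
  | cons line rest ih =>
    intro d₁ d₂ h₁ h₂ h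
    obtain ⟨hA, hAv⟩ := lineA_char line.toList d₁ h₁
    obtain ⟨hB, hBv⟩ := lineB_char line.toList d₂.items PySem.Dict.empty goodD_empty h₂.2
    have hperm := items_perm d₁ d₂ h₁ h₂ h
    have hstep : ∀ q, ((PySem.List.enumerate line.toList 0).foldl (stepA line.toList) d₁).getD q 0
        = (d₂.items.foldl (stepB line.toList) PySem.Dict.empty).getD q 0 := by
      intro q
      rw [hAv q, hBv q]
      have : Wl d₁.items (fun p => distL line.toList p q)
          = Wl d₂.items (fun p => distL line.toList p q) :=
        (hperm.map _).sum_eq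
      rw [this, PySem.Dict.getD_empty]
      ring
    simpa using ih _ _ hA hB hstep

theorem values_sum_eq (d₁ d₂ : PySem.Dict Int Int) (h₁ : goodD d₁) (h₂ : goodD d₂)
    (h : ∀ q, d₁.getD q 0 = d₂.getD q 0) : d₁.values.sum = d₂.values.sum := by
  have hperm := items_perm d₁ d₂ h₁ h₂ h
  exact (hperm.map Prod.snd).sum_eq

-- ===== VERDICT (by name: the statement is the Claim_ definition above) =====
theorem solve_spec : Claim_equal_solve := by
  intro data _ hpre
  unfold Spec_solve
  cases hg : PySem.List.pyGet? data 0 with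
  | none => simp only [solve, solve_alt, hg]
  | some first =>
    cases hidx : PySem.List.index? first.toList 'S' with
    | none => simp only [solve, solve_alt, hg, hidx]
    | some idx =>
      simp only [solve, solve_alt, hg, hidx]
      -- the two seeds are the same dict
      have hinit : PySem.Dict.counter [(idx : Int)]
          = (PySem.Dict.empty : PySem.Dict Int Int).insert (idx : Int) 1 := by
        show (PySem.Dict.empty : PySem.Dict Int Int).modify (idx : Int) 0 (· + 1) = _
        rw [PySem.Dict.modify, PySem.Dict.getD_empty, zero_add]
      have hgood : goodD ((PySem.Dict.empty : PySem.Dict Int Int).insert (idx : Int) 1) := by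
        constructor
        · exact PySem.Dict.nodup_keys_insert _ _ _ goodD_empty.1
        · intro pc hpc
          rcases (PySem.Dict.mem_items_insert _ _ _ _).mp hpc with h1 | h1
          · rw [h1]; norm_num
          · exact absurd h1.1 (by simp [PySem.Dict.empty])
      obtain ⟨hA, hB, hval⟩ := lines_inv data
        (PySem.Dict.counter [(idx : Int)])
        ((PySem.Dict.empty : PySem.Dict Int Int).insert (idx : Int) 1)
        (hinit ▸ hgood) hgood (by intro q; rw [hinit])
      exact values_sum_eq _ _ hA hB hval
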